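-- pv_equiv track=rewrite | github.com/marcel-krause/advent-of-code | 2024/Day21.py | create_numerical_keyboard
-- ===== SOURCE A (Python) =====
-- def create_numerical_keyboard(key_positions):
--     keyboard = []
--
--     for y in range(6):
--         line = []
--         for x in range(5):
--             if (y, x) not in key_positions.values():
--                 line.append('X')
--             else:
--                 for key, val in key_positions.items():
--                     if val == (y, x):
--                         line.append(key)
--                         break
--
--         keyboard.append(line)
--
--     return keyboard
-- ===== SOURCE B (Python) =====
-- def create_numerical_keyboard(key_positions):
--     # Scatter: one pass over the items, writing keys into a preallocated grid.
--     grid = [[None] * 5 for _ in range(6)]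
--     for key, (y, x) in key_positions.items():
--         if 0 <= y < 6 and 0 <= x < 5 and grid[y][x] is None:
--             grid[y][x] = key
--     return [[c if c is not None else 'X' for c in row] for row in grid]
-- ===== Notes on version B (the rewrite author's own statement) =====
-- stated objective: faster
-- what changed: B inverts the traversal: instead of scanning the dict's values and items for every one of the 30 grid cells, it makes a single scatter pass over the items, writing each key into a preallocated None-grid (first write wins, out-of-range positions skipped) and finally renders None as 'X'.
import Mathlib
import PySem

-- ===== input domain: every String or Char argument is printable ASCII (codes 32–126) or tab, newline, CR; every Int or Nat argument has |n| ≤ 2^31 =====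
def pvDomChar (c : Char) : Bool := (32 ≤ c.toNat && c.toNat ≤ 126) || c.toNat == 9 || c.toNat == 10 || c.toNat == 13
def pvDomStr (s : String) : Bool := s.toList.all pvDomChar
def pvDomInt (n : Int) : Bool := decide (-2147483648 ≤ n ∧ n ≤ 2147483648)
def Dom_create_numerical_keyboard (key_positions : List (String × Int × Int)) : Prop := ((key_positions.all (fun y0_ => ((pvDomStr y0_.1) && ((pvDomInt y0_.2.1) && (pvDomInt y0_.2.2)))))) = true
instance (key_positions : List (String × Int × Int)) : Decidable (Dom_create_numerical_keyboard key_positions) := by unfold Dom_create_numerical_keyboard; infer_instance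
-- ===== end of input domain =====

-- B inverts the traversal: one scatter pass over the items writing keys into a preallocated
-- None-grid (first write wins, out-of-range skipped), then renders None as 'X'.
-- ===== PORT A =====
-- inner `for key, val in items(): if val == (y,x): append; break`
def pvInnerScan (kps : List (String × Int × Int)) (p : Int × Int) (line : List String) : List String :=
  match kps with
  | [] => line
  | (k, v) :: rest => if v = p then line ++ [k] else pvInnerScan rest p line

def create_numerical_keyboard (key_positions : List (String × Int × Int)) : List (List String) :=
  (PySem.List.pyRange 0 6 1).foldl (fun keyboard y =>
    keyboard ++ [ (PySem.List.pyRange 0 5 1).foldl (fun line x =>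
      if ¬ ((y, x) ∈ key_positions.map (fun e => e.2)) then line ++ ["X"]
      else pvInnerScan key_positions (y, x) line) [] ]) []

-- ===== PORT B =====
-- `for key, (y, x) in items(): if in range and grid[y][x] is None: grid[y][x] = key`
-- (`c.or (some key)` is exactly "write key only if the cell is still None")
def pvFoldGrid (kps : List (String × Int × Int)) (g : List (List (Option String))) :
    List (List (Option String)) :=
  kps.foldl (fun g e =>
    if 0 ≤ e.2.1 ∧ e.2.1 < 6 ∧ 0 ≤ e.2.2 ∧ e.2.2 < 5 then
      g.modify e.2.1.toNat (fun row => row.modify e.2.2.toNat (fun c => c.or (some e.1)))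
    else g) g

def create_numerical_keyboard_alt (key_positions : List (String × Int × Int)) : List (List String) :=
  (pvFoldGrid key_positions (List.replicate 6 (List.replicate 5 (none : Option String)))).map
    (fun row => row.map (fun c => c.getD "X"))

-- ===== PRECONDITION & SPEC =====
def Spec_create_numerical_keyboard (key_positions : List (String × Int × Int)) (out : List (List String)) : Prop := out = create_numerical_keyboard_alt key_positions
instance (key_positions : List (String × Int × Int)) (out : List (List String)) : Decidable (Spec_create_numerical_keyboard key_positions out) := by unfold Spec_create_numerical_keyboard; infer_instance

-- ===== CLAIM =====
def Claim_equal_create_numerical_keyboard : Prop := ∀ (key_positions : List (String × Int × Int)), Dom_create_numerical_keyboard key_positions → Spec_create_numerical_keyboard key_positions (create_numerical_keyboard key_positions)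

-- ===== LEMMAS AND PROOFS =====

def pvCellVal (kps : List (String × Int × Int)) (y x : Int) : String :=
  ((kps.find? (fun e => e.2 = (y, x))).map (fun e => e.1)).getD "X"

def pvEntry (g : List (List (Option String))) (y x : Nat) : Option (Option String) :=
  (g[y]?).bind (fun row => row[x]?)

lemma pvInnerScan_eq (kps : List (String × Int × Int)) (p : Int × Int) (line : List String) :
    pvInnerScan kps p line =
      line ++ (match kps.find? (fun e => e.2 = p) with
               | some e => [e.1]
               | none => []) := by
  induction kps with
  | nil => simp [pvInnerScan]
  | cons hd tl ih =>
    obtain ⟨k, v⟩ := hd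
    by_cases h : v = p <;> simp [pvInnerScan, List.find?, h, ih]

lemma mem_values_iff_find (kps : List (String × Int × Int)) (p : Int × Int) :
    (p ∈ kps.map (fun e => e.2)) ↔ (kps.find? (fun e => e.2 = p)).isSome := by
  rw [List.find?_isSome]
  simp [List.mem_map, eq_comm]

lemma cellA_eq (kps : List (String × Int × Int)) (p : Int × Int) (line : List String) :
    (if ¬ (p ∈ kps.map (fun e => e.2)) then line ++ ["X"] else pvInnerScan kps p line) =
      line ++ [pvCellVal kps p.1 p.2] := by
  by_cases h : p ∈ kps.map (fun e => e.2)
  · rw [if_neg (by simpa using h), pvInnerScan_eq]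
    rcases Option.isSome_iff_exists.mp ((mem_values_iff_find kps p).mp h) with ⟨e, he⟩
    simp [pvCellVal, he]
  · rw [if_pos (by simpa using h)]
    have : kps.find? (fun e => e.2 = p) = none := by
      cases hh : kps.find? (fun e => e.2 = p) with
      | none => rfl
      | some e => exact absurd ((mem_values_iff_find kps p).mpr (by simp [hh])) h
    simp [pvCellVal, this]

lemma pvEntry_modify (g : List (List (Option String))) (yt xt yn xn : Nat)
    (f : Option String → Option String) :
    pvEntry (g.modify yt (fun row => row.modify xt f)) yn xn =
      if yt = yn ∧ xt = xn then (pvEntry g yn xn).map f else pvEntry g yn xn := by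
  unfold pvEntry
  rw [List.getElem?_modify]
  cases hg : g[yn]? with
  | none => split_ifs <;> simp
  | some row =>
    by_cases hy : yt = yn
    · simp only [hy, if_true, Option.bind_some]
      by_cases hx : xt = xn
      · simp [hx]
      · simp [hx]
    · simp [hy]

lemma pvEntry_fold (kps : List (String × Int × Int)) :
    ∀ (g : List (List (Option String))) (yn xn : Nat), yn < 6 → xn < 5 →
      pvEntry (pvFoldGrid kps g) yn xn =
        (pvEntry g yn xn).map
          (fun c => c.or ((kps.find? (fun e => e.2 = ((yn : Int), (xn : Int)))).map (fun e => e.1))) := by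
  induction kps with
  | nil =>
    intro g yn xn _ _
    unfold pvFoldGrid
    cases h : pvEntry g yn xn <;> simp [h]
  | cons hd tl ih =>
    intro g yn xn hy hx
    obtain ⟨k, y, x⟩ := hd
    have hstep : pvFoldGrid ((k, y, x) :: tl) g =
        pvFoldGrid tl (if 0 ≤ y ∧ y < 6 ∧ 0 ≤ x ∧ x < 5 then
          g.modify y.toNat (fun row => row.modify x.toNat (fun c => c.or (some k)))
        else g) := by
      unfold pvFoldGrid; simp
    rw [hstep]
    by_cases hg : 0 ≤ y ∧ y < 6 ∧ 0 ≤ x ∧ x < 5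
    · rw [if_pos hg]
      by_cases hidx : y = (yn : Int) ∧ x = (xn : Int)
      · obtain ⟨h1, h2⟩ := hidx
        subst h1; subst h2
        have hyt : ((yn : Int)).toNat = yn := by omega
        have hxt : ((xn : Int)).toNat = xn := by omega
        rw [ih _ yn xn hy hx, pvEntry_modify, if_pos ⟨hyt, hxt⟩]
        cases hpe : pvEntry g yn xn with
        | none => simp [List.find?]
        | some c => cases c <;> simp [List.find?]
      · have h2 : ¬ (((y, x) : Int × Int) = ((yn : Int), (xn : Int))) := by
          simp only [Prod.mk.injEq, not_and]; intro a b; exact hidx ⟨a, b⟩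
        rw [ih _ yn xn hy hx, pvEntry_modify, if_neg (by intro h; exact hidx ⟨by omega, by omega⟩)]
        simp [List.find?, h2]
    · rw [if_neg hg]
      rw [ih _ yn xn hy hx]
      have h2 : ¬ (((y, x) : Int × Int) = ((yn : Int), (xn : Int))) := by
        simp only [Prod.mk.injEq, not_and]; intro a b; exact hg (by omega)
      simp [List.find?, h2]

lemma pvFoldGrid_length (kps : List (String × Int × Int)) :
    ∀ g : List (List (Option String)), (pvFoldGrid kps g).length = g.length := by
  induction kps with
  | nil => intro g; simp [pvFoldGrid]
  | cons hd tl ih =>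
    intro g
    have hstep : pvFoldGrid (hd :: tl) g =
        pvFoldGrid tl (if 0 ≤ hd.2.1 ∧ hd.2.1 < 6 ∧ 0 ≤ hd.2.2 ∧ hd.2.2 < 5 then
          g.modify hd.2.1.toNat (fun row => row.modify hd.2.2.toNat (fun c => c.or (some hd.1)))
        else g) := by
      unfold pvFoldGrid; simp
    rw [hstep, ih]
    split_ifs <;> simp

lemma pvFoldGrid_rowlen (kps : List (String × Int × Int)) :
    ∀ (g : List (List (Option String))) (j : Nat),
      ((pvFoldGrid kps g)[j]?).map List.length = (g[j]?).map List.length := by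
  induction kps with
  | nil => intro g j; simp [pvFoldGrid]
  | cons hd tl ih =>
    intro g j
    have hstep : pvFoldGrid (hd :: tl) g =
        pvFoldGrid tl (if 0 ≤ hd.2.1 ∧ hd.2.1 < 6 ∧ 0 ≤ hd.2.2 ∧ hd.2.2 < 5 then
          g.modify hd.2.1.toNat (fun row => row.modify hd.2.2.toNat (fun c => c.or (some hd.1)))
        else g) := by
      unfold pvFoldGrid; simp
    rw [hstep, ih]
    split_ifs with h
    · rw [List.getElem?_modify]
      cases g[j]? <;> simp
      split_ifs <;> simp [List.length_modify]
    · rfl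

lemma altB_eq (kps : List (String × Int × Int)) :
    create_numerical_keyboard_alt kps =
      (List.range 6).map (fun y => (List.range 5).map (fun x => pvCellVal kps (Int.ofNat y) (Int.ofNat x))) := by
  unfold create_numerical_keyboard_alt
  set g0 : List (List (Option String)) := List.replicate 6 (List.replicate 5 (none : Option String)) with hg0
  apply List.ext_getElem?
  intro n
  rw [List.getElem?_map, List.getElem?_map]
  have hlen : (pvFoldGrid kps g0).length = 6 := by rw [pvFoldGrid_length]; simp [hg0]
  by_cases hn : n < 6
  · have hrow : ∃ row, (pvFoldGrid kps g0)[n]? = some row :=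
      ⟨_, List.getElem?_eq_getElem (by omega)⟩
    obtain ⟨row, hrow⟩ := hrow
    have hrl : row.length = 5 := by
      have hthis := pvFoldGrid_rowlen kps g0 n
      rw [hrow, hg0, List.getElem?_replicate, if_pos hn] at hthis
      simpa using hthis
    rw [hrow, List.getElem?_range hn]
    simp only [Option.map_some]
    congr 1
    apply List.ext_getElem?
    intro m
    rw [List.getElem?_map, List.getElem?_map]
    by_cases hm : m < 5
    · have hentry := pvEntry_fold kps g0 n m hn hm
      have hinit : pvEntry g0 n m = some none := by
        unfold pvEntry
        rw [hg0, List.getElem?_replicate, if_pos hn, Option.bind_some,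
          List.getElem?_replicate, if_pos hm]
      rw [hinit] at hentry
      have hcell : row[m]? = some ((kps.find? (fun e => e.2 = ((n : Int), (m : Int)))).map (fun e => e.1)) := by
        have : pvEntry (pvFoldGrid kps g0) n m = row[m]? := by simp [pvEntry, hrow]
        rw [← this, hentry]; simp
      rw [hcell, List.getElem?_range hm]
      simp [pvCellVal]
    · have : row[m]? = none := List.getElem?_eq_none (by omega)
      rw [this, List.getElem?_eq_none (by simp; omega)]
      rfl
  · rw [List.getElem?_eq_none (by omega), List.getElem?_eq_none (by simp; omega)]
    rfl

-- ===== VERDICT =====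
theorem create_numerical_keyboard_spec : Claim_equal_create_numerical_keyboard := by
  intro kps _
  unfold Spec_create_numerical_keyboard create_numerical_keyboard
  rw [altB_eq]
  have h6 : PySem.List.pyRange 0 6 1 = [0, 1, 2, 3, 4, 5] := by decide
  have h5 : PySem.List.pyRange 0 5 1 = [0, 1, 2, 3, 4] := by decide
  have r6 : List.range 6 = [0, 1, 2, 3, 4, 5] := by decide
  have r5 : List.range 5 = [0, 1, 2, 3, 4] := by decide
  simp only [h6, h5, r6, r5, List.foldl_cons, List.foldl_nil, List.map_cons, List.map_nil,
    cellA_eq]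
  norm_num
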